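-- pv_equiv track=rewrite | github.com/daniel-reich/ubiquitous-fiesta | ke4FSMdG2XYxbGQny_24.py | even_odd_transform
-- ===== SOURCE A (Python) =====
-- def even_odd_transform(lst, n):
--   for i in range(len(lst)):
--     for j in range(n):
--       if lst[i] %2==0 :
--         lst[i]-= 2
--       else :
--         lst[i]+= 2
--   return lst
-- ===== SOURCE B (Python) =====
-- def even_odd_transform(lst, n):
--   k = 2 * max(n, 0)
--   lst[:] = [x - k if x % 2 == 0 else x + k for x in lst]
--   return lst
-- ===== Notes on version B (the rewrite author's own statement) =====
-- stated objective: faster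
-- what changed: Replaces the nested per-element loop of n single +/-2 steps with a closed-form adjustment of 2*max(n,0) per element, chosen by the element's (invariant) parity, in one list comprehension.
import Mathlib
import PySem

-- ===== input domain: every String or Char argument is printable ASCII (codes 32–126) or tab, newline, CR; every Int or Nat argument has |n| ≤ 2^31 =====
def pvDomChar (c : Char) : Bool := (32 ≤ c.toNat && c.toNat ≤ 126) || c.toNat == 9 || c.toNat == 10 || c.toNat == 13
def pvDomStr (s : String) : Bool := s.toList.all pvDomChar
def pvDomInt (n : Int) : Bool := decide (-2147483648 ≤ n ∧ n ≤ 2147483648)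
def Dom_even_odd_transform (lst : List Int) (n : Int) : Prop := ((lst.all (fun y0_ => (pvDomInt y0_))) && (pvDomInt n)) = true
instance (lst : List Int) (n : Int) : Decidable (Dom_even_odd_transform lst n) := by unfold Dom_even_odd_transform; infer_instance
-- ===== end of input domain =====

-- B replaces A's O(len*n) nested ±2 stepping by a closed-form per-element adjustment of
-- 2*max(n,0) chosen by parity (O(len)). Both A and B mutate lst in place in Python; the
-- equivalence proved here is about the return value.

-- ===== PORT A =====
-- one inner-loop body step: lst[i] -= 2 if even else lst[i] += 2
def pvInnerStep (acc : List Int) (i : Int) : List Int :=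
  if PySem.Int.mod (PySem.List.pyGetD acc i 0) 2 == 0 then
    PySem.List.pySetD acc i (PySem.List.pyGetD acc i 0 - 2)
  else
    PySem.List.pySetD acc i (PySem.List.pyGetD acc i 0 + 2)

def even_odd_transform (lst : List Int) (n : Int) : List Int :=
  (PySem.List.pyRange 0 lst.length 1).foldl
    (fun acc i => (PySem.List.pyRange 0 n 1).foldl (fun acc2 _ => pvInnerStep acc2 i) acc) lst

-- ===== PORT B =====
def even_odd_transform_alt (lst : List Int) (n : Int) : List Int :=
  let k := 2 * max n 0
  lst.map (fun x => if PySem.Int.mod x 2 == 0 then x - k else x + k)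

-- ===== PRECONDITION & SPEC =====
def Spec_even_odd_transform (lst : List Int) (n : Int) (out : List Int) : Prop := out = even_odd_transform_alt lst n
instance (lst : List Int) (n : Int) (out : List Int) : Decidable (Spec_even_odd_transform lst n out) := by unfold Spec_even_odd_transform; infer_instance

-- ===== CLAIM (what is proved, stated in full; the proofs are below) =====
def Claim_equal_even_odd_transform : Prop := ∀ (lst : List Int) (n : Int), Dom_even_odd_transform lst n → Spec_even_odd_transform lst n (even_odd_transform lst n)

-- ===== LEMMAS AND PROOFS =====

-- the effect of one inner-loop step on the touched element
def pvG (x : Int) : Int := if PySem.Int.mod x 2 == 0 then x - 2 else x + 2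

lemma pvMod2_sub (x : Int) : PySem.Int.mod (x - 2) 2 = PySem.Int.mod x 2 := by
  simp [Int.sub_emod_right]

lemma pvMod2_add (x : Int) : PySem.Int.mod (x + 2) 2 = PySem.Int.mod x 2 := by
  simp [Int.add_emod_right]

lemma pvMod2_G (x : Int) : PySem.Int.mod (pvG x) 2 = PySem.Int.mod x 2 := by
  unfold pvG
  split
  · exact pvMod2_sub x
  · exact pvMod2_add x

lemma pvG_iter (m : Nat) (x : Int) :
    pvG^[m] x = if PySem.Int.mod x 2 == 0 then x - 2 * m else x + 2 * m := by
  induction m generalizing x with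
  | zero => simp
  | succ m ih =>
    rw [Function.iterate_succ_apply, ih, pvMod2_G]
    unfold pvG
    by_cases h : (PySem.Int.mod x 2 == 0) = true
    · rw [if_pos h, if_pos h, if_pos h]
      push_cast
      ring
    · rw [if_neg h, if_neg h, if_neg h]
      push_cast
      ring

lemma pvInnerStep_eq (acc : List Int) (i : Nat) (h : i < acc.length) :
    pvInnerStep acc (i : Int) = acc.set i (pvG acc[i]) := by
  unfold pvInnerStep pvG
  rw [PySem.List.pyGetD_natCast, List.getD, List.getElem?_eq_getElem h]
  simp only [Option.getD_some, PySem.List.pySetD_natCast, apply_ite (acc.set i)]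

lemma pvInnerFold (l : List Int) (acc : List Int) (i : Nat) (h : i < acc.length) :
    l.foldl (fun a _ => pvInnerStep a (i : Int)) acc = acc.set i (pvG^[l.length] acc[i]) := by
  induction l generalizing acc with
  | nil => simp
  | cons a l ih =>
    rw [List.foldl_cons, pvInnerStep_eq acc i h,
        ih (acc.set i (pvG acc[i])) (by simpa using h), List.set_set]
    congr 1
    rw [List.getElem_set_self, List.length_cons, Function.iterate_succ_apply]

lemma pvOuter (n : Int) (ys pre : List Int) :
    (PySem.List.pyRange (pre.length : Int) ((pre.length : Int) + ys.length) 1).foldl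
      (fun acc i => (PySem.List.pyRange 0 n 1).foldl (fun acc2 _ => pvInnerStep acc2 i) acc)
      (pre ++ ys)
    = pre ++ ys.map (fun x => pvG^[(PySem.List.pyRange 0 n 1).length] x) := by
  induction ys generalizing pre with
  | nil => simp [PySem.List.pyRange_one_eq_nil]
  | cons y ys ih =>
    have hlt : (pre.length : Int) < (pre.length : Int) + (y :: ys).length := by
      simp only [List.length_cons]
      push_cast
      omega
    rw [PySem.List.pyRange_one_cons hlt, List.foldl_cons]
    have hi : pre.length < (pre ++ y :: ys).length := by simp
    rw [pvInnerFold _ _ _ hi]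
    have hget : (pre ++ y :: ys)[pre.length] = y := by
      rw [List.getElem_append_right (le_refl pre.length)]; simp
    have hset : ∀ v : Int, (pre ++ y :: ys).set pre.length v = (pre ++ [v]) ++ ys := by
      intro v
      rw [List.set_append]
      simp
    rw [hget, hset]
    have hb1 : ((pre.length : Int) + 1) = (((pre ++ [pvG^[(PySem.List.pyRange 0 n 1).length] y]).length : Nat) : Int) := by
      simp
    have hb2 : ((pre.length : Int) + ((y :: ys).length : Int)) =
        (((pre ++ [pvG^[(PySem.List.pyRange 0 n 1).length] y]).length : Nat) : Int) + (ys.length : Int) := by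
      simp only [List.length_cons, List.length_append, List.length_nil]
      push_cast
      omega
    rw [hb1, hb2, ih]
    simp

-- ===== VERDICT (by name: the statement is the Claim_ definition above) =====
theorem even_odd_transform_spec : Claim_equal_even_odd_transform := by
  intro lst n _
  unfold Spec_even_odd_transform even_odd_transform even_odd_transform_alt
  have h0 := pvOuter n lst []
  simp only [List.length_nil, Nat.cast_zero, List.nil_append, zero_add] at h0
  rw [h0]
  apply List.map_congr_left
  intro x _
  rw [pvG_iter]
  have hlen : ((PySem.List.pyRange 0 n 1).length : Int) = max n 0 := by
    rw [PySem.List.length_pyRange_one]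
    omega
  rw [hlen]
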